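-- pv_equiv track=rewrite | github.com/atoye1/Programmers | 프로그래머스/lv2/42586. 기능개발/기능개발.py | solution
-- ===== SOURCE A (Python) =====
-- import math
-- from collections import deque
--
-- def solution(progresses, speeds):
--     answer = []
--     p_q = deque(progresses)
--     s_q = deque(speeds)
--     counts = deque()
--
--     while p_q:
--         count = math.ceil((100 - p_q.popleft()) / s_q.popleft())
--         counts.append(count)
--
--     while counts:
--         curr_count = counts.popleft()
--         completed = 1
--         while True and counts:
--             if counts[0] <= curr_count:
--                 counts.popleft()
--                 completed += 1
--             else:
--                 break
--         answer.append(completed)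
--     return answer
-- ===== SOURCE B (Python) =====
-- def solution(progresses, speeds):
--     # days to finish each task, exact integer ceiling of (100-p)/s
--     days = [-((p - 100) // s) for p, s in zip(progresses, speeds)]
--     if not days:
--         return []
--     answer = []
--     leader = days[0]
--     count = 0
--     for d in days:
--         if d <= leader:
--             count += 1
--         else:
--             answer.append(count)
--             leader = d
--             count = 1
--     answer.append(count)
--     return answer
-- ===== Notes on version B (the rewrite author's own statement) =====
-- stated objective: simpler
-- what changed: Replaces the deque-draining nested popleft loop with a precomputed days list and one flat leader-accumulator scan; integer ceiling division replaces float math.ceil and all deque operations disappear (constant-factor speedup).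
import Mathlib
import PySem

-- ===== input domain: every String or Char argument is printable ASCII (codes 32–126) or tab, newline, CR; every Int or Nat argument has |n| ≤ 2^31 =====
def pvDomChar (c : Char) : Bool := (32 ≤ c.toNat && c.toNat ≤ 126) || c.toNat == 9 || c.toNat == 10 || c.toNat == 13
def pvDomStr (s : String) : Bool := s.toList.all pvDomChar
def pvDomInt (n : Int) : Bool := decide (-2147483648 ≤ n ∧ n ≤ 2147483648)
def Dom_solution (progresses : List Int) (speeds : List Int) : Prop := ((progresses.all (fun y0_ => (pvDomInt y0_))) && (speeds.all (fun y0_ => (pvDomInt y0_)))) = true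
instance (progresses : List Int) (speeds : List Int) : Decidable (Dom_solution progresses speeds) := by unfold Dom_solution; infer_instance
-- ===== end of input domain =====

-- B replaces A's deque-draining nested popleft loop by one flat leader-accumulator scan
-- over a precomputed days list (simpler; return value only, no mutation observable).


-- ===== PORT A =====
-- math.ceil((100 - p) / s) on ints with |p|,|s| ≤ 2^31: the float division's ceiling is
-- exact there, hence ported as the exact integer ceiling -((-(100 - p)) // s).
def pvCeilA (p s : Int) : Int := -(PySem.Int.floordiv (-(100 - p)) s)

-- first while loop: pop p_q and s_q in step, building counts
-- (the case 'p_q nonempty, s_q empty' is an IndexError in Python; excluded by Pre_)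
def pvBuildCounts : List Int → List Int → List Int
  | [], _ => []
  | _ :: _, [] => []
  | p :: ps, s :: ss => pvCeilA p s :: pvBuildCounts ps ss

-- inner 'while True and counts' loop: consume the prefix ≤ curr_count
def pvEat (curr completed : Int) : List Int → Int × List Int
  | [] => (completed, [])
  | x :: xs => if x ≤ curr then pvEat curr (completed + 1) xs else (completed, x :: xs)

theorem pvEat_len (curr completed : Int) (l : List Int) :
    (pvEat curr completed l).2.length ≤ l.length := by
  induction l generalizing completed with
  | nil => simp [pvEat]
  | cons x xs ih =>
    simp only [pvEat]
    split
    · exact le_trans (ih _) (Nat.le_succ _)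
    · simp

-- outer 'while counts' loop
def pvDrain : List Int → List Int
  | [] => []
  | c :: rest =>
      let r := pvEat c 1 rest
      r.1 :: pvDrain r.2
termination_by l => l.length
decreasing_by exact Nat.lt_succ_of_le (pvEat_len _ _ _)

def solution (progresses : List Int) (speeds : List Int) : List Int :=
  pvDrain (pvBuildCounts progresses speeds)

-- ===== PORT B =====
def solution_alt (progresses : List Int) (speeds : List Int) : List Int :=
  let days := (progresses.zip speeds).map (fun q => -(PySem.Int.floordiv (q.1 - 100) q.2))
  match days with
  | [] => []
  | d0 :: _ =>
      let r := days.foldl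
        (fun (acc : List Int × Int × Int) d =>
          if d ≤ acc.2.1 then (acc.1, acc.2.1, acc.2.2 + 1)
          else (acc.1 ++ [acc.2.2], d, 1))
        ([], d0, 0)
      r.1 ++ [r.2.2]

-- ===== PRECONDITION & SPEC =====
-- Pre_ excludes exactly the inputs where A raises: a missing paired speed (IndexError)
-- or a zero among the used speeds (ZeroDivisionError).
def Pre_solution (progresses : List Int) (speeds : List Int) : Prop :=
  progresses.length ≤ speeds.length ∧ ∀ s ∈ speeds.take progresses.length, s ≠ 0
instance (progresses : List Int) (speeds : List Int) : Decidable (Pre_solution progresses speeds) := by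
  unfold Pre_solution; infer_instance
def pvWitness_solution : List Int × List Int := ([93, 30, 55], [1, 30, 5])

def Spec_solution (progresses : List Int) (speeds : List Int) (out : List Int) : Prop := out = solution_alt progresses speeds
instance (progresses : List Int) (speeds : List Int) (out : List Int) : Decidable (Spec_solution progresses speeds out) := by unfold Spec_solution; infer_instance

-- ===== CLAIM (what is proved, stated in full; the proofs are below) =====
def Claim_equal_solution : Prop := ∀ (progresses : List Int) (speeds : List Int), Dom_solution progresses speeds → Pre_solution progresses speeds → Spec_solution progresses speeds (solution progresses speeds)
-- ===== LEMMAS AND PROOFS =====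

-- the two ceiling formulas coincide: -(100 - p) = p - 100
theorem pvCeilA_eq (p s : Int) : pvCeilA p s = -(PySem.Int.floordiv (p - 100) s) := by
  unfold pvCeilA; ring_nf

-- A's first loop computes B's days list
theorem pvBuildCounts_eq (ps ss : List Int) :
    pvBuildCounts ps ss = (ps.zip ss).map (fun q => -(PySem.Int.floordiv (q.1 - 100) q.2)) := by
  induction ps generalizing ss with
  | nil => simp [pvBuildCounts]
  | cons p ps ih =>
    cases ss with
    | nil => simp [pvBuildCounts]
    | cons s ss => simp [pvBuildCounts, ih, pvCeilA_eq]

-- main bridge: B's fold over the remaining days equals A's eat/drain decomposition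
def pvStep (acc : List Int × Int × Int) (d : Int) : List Int × Int × Int :=
  if d ≤ acc.2.1 then (acc.1, acc.2.1, acc.2.2 + 1) else (acc.1 ++ [acc.2.2], d, 1)

theorem pvFold_eq (rest : List Int) (ans : List Int) (c n : Int) :
    (rest.foldl pvStep (ans, c, n)).1 ++ [(rest.foldl pvStep (ans, c, n)).2.2]
    = ans ++ ((pvEat c n rest).1 :: pvDrain (pvEat c n rest).2) := by
  induction rest generalizing ans c n with
  | nil => simp [pvEat, pvDrain]
  | cons x xs ih =>
    by_cases h : x ≤ c
    · simpa [List.foldl, pvStep, pvEat, h] using ih ans c (n + 1)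
    · have := ih (ans ++ [n]) x 1
      simp only [List.foldl, pvStep, pvEat, h, if_false] at *
      rw [this, pvDrain]
      simp

theorem solution_eq_alt (progresses speeds : List Int) :
    solution progresses speeds = solution_alt progresses speeds := by
  unfold solution solution_alt
  rw [pvBuildCounts_eq]
  cases hd : (progresses.zip speeds).map (fun q => -(PySem.Int.floordiv (q.1 - 100) q.2)) with
  | nil => simp [pvDrain]
  | cons d0 ds =>
    show pvDrain (d0 :: ds) = _
    rw [pvDrain]
    have hstep : (fun (acc : List Int × Int × Int) d =>
        if d ≤ acc.2.1 then (acc.1, acc.2.1, acc.2.2 + 1)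
        else (acc.1 ++ [acc.2.2], d, 1)) = pvStep := rfl
    simp only [List.foldl, hstep]
    simp only [le_refl, if_true]
    rw [pvFold_eq]
    simp

-- ===== VERDICT (by name: the statement is the Claim_ definition above) =====
theorem solution_spec : Claim_equal_solution := by
  intro ps ss _ _
  unfold Spec_solution
  exact solution_eq_alt ps ss
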